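-- pv_equiv track=rewrite | github.com/BialySztorm/AoC2024 | days/day21.py | write_text2
-- ===== SOURCE A (Python) =====
-- def write_text2(text):
--     keypad = [[None,"^","A"], ["<","v",">"]]
--     y = 0
--     x = 2
--     empty_pos = [0,0]
--     seq = ""
--     for char in text:
--         char_pos = [0,0]
--         for i in range(len(keypad)):
--             if char in keypad[i]:
--                 char_pos = [keypad[i].index(char),i]
--                 break
--         y_vector = char_pos[1] - y
--         x_vector = char_pos[0] - x
--         if y == empty_pos[1]:
--             if y_vector > 0:
--                 seq += "v"*y_vector
--             else:
--                 seq += "^"*abs(y_vector)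
--             if x_vector > 0:
--                 seq += ">"*x_vector
--             else:
--                 seq += "<"*abs(x_vector)
--             seq += "A"
--         else:
--             if x_vector > 0:
--                 seq += ">"*x_vector
--             else:
--                 seq += "<"*abs(x_vector)
--             if y_vector > 0:
--                 seq += "v"*y_vector
--             else:
--                 seq += "^"*abs(y_vector)
--             seq += "A"
--         x = char_pos[0]
--         y = char_pos[1]
--     return seq
-- ===== SOURCE B (Python) =====
-- def write_text2(text):
--     pos = {'^': (1, 0), 'A': (2, 0), '<': (0, 1), 'v': (1, 1), '>': (2, 1)}
--
--     def walk(cur, dst, vert_first):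
--         # simulate the robot one key at a time; axis priority fixed by the leg's start row
--         x, y = cur
--         tx, ty = dst
--         if vert_first and y != ty:
--             return ('v' if ty > y else '^') + walk((x, y + (1 if ty > y else -1)), dst, vert_first)
--         if x != tx:
--             return ('>' if tx > x else '<') + walk((x + (1 if tx > x else -1), y), dst, vert_first)
--         if y != ty:
--             return ('v' if ty > y else '^') + walk((x, y + (1 if ty > y else -1)), dst, vert_first)
--         return 'A'
--
--     out = []
--     cur = (2, 0)
--     for ch in text:
--         dst = pos.get(ch, (0, 0))
--         out.append(walk(cur, dst, cur[1] == 0))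
--         cur = dst
--     return ''.join(out)
-- ===== Notes on version B (the rewrite author's own statement) =====
-- stated objective: alternative
-- what changed: B replaces A's row-scan plus signed-delta arithmetic and string multiplication by a recursive unit-step simulation: it walks the robot one key at a time toward the target (axis priority fixed by the leg's start row), collecting legs in a list joined once at the end instead of A's repeated string +=.
import Mathlib
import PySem

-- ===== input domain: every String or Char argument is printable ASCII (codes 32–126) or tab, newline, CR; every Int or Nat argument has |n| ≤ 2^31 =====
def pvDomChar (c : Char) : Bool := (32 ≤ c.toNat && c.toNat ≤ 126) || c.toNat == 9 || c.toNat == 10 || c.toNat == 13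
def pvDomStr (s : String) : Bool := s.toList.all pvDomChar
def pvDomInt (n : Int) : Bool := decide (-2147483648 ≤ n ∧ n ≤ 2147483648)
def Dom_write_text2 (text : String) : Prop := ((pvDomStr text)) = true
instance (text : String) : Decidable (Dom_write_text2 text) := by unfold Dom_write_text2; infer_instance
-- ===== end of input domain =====

-- B replaces A's delta arithmetic and string repetition by a recursive one-key-at-a-time
-- walk of the robot (alternative decomposition, same cost).


-- ===== PORT A =====
-- keypad = [[None,"^","A"], ["<","v",">"]]  (None cells as `none`)
def keypadA : List (List (Option Char)) := [[none, some '^', some 'A'], [some '<', some 'v', some '>']]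

-- "s"*n for a possibly non-positive n (Python string repetition)
def pyMulStr (s : String) (n : Int) : String := String.join (List.replicate n.toNat s)

-- the inner `for i in range(len(keypad)): if char in keypad[i]: char_pos = [...]; break`
def charPosLoopA (c : Char) (rows : List (List (Option Char))) (i : Int) : Int × Int :=
  match rows with
  | [] => (0, 0)
  | r :: rest =>
      if (some c) ∈ r then (((PySem.List.index? r (some c)).getD 0 : Nat), i)
      else charPosLoopA c rest (i + 1)

-- one iteration of A's main loop; state = (y, x, seq)
def stepA (st : Int × Int × String) (c : Char) : Int × Int × String :=
  let y := st.1
  let x := st.2.1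
  let seq := st.2.2
  let cp := charPosLoopA c keypadA 0
  let yv := cp.2 - y
  let xv := cp.1 - x
  let seq :=
    if y = 0 then          -- y == empty_pos[1]
      let s1 := if yv > 0 then seq ++ pyMulStr "v" yv else seq ++ pyMulStr "^" |yv|
      let s2 := if xv > 0 then s1 ++ pyMulStr ">" xv else s1 ++ pyMulStr "<" |xv|
      s2 ++ "A"
    else
      let s1 := if xv > 0 then seq ++ pyMulStr ">" xv else seq ++ pyMulStr "<" |xv|
      let s2 := if yv > 0 then s1 ++ pyMulStr "v" yv else s1 ++ pyMulStr "^" |yv|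
      s2 ++ "A"
  (cp.2, cp.1, seq)

def write_text2 (text : String) : String :=
  (text.toList.foldl stepA (0, 2, "")).2.2

-- ===== PORT B =====
def posOfB : PySem.Dict Char (Int × Int) :=
  PySem.Dict.ofList [('^', (1, 0)), ('A', (2, 0)), ('<', (0, 1)), ('v', (1, 1)), ('>', (2, 1))]

-- Source B's recursive `walk`; a fuel argument (Manhattan distance + 1, supplied at the call
-- site) makes the recursion structural — with enough fuel it is exactly the Python recursion.
def walkB (fuel : Nat) (cur dst : Int × Int) (vf : Bool) : String :=
  match fuel with
  | 0 => "A"   -- never reached when fuel ≥ distance + 1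
  | n + 1 =>
      if vf && cur.2 ≠ dst.2 then
        (if dst.2 > cur.2 then "v" else "^") ++
          walkB n (cur.1, cur.2 + (if dst.2 > cur.2 then 1 else -1)) dst vf
      else if cur.1 ≠ dst.1 then
        (if dst.1 > cur.1 then ">" else "<") ++
          walkB n (cur.1 + (if dst.1 > cur.1 then 1 else -1), cur.2) dst vf
      else if cur.2 ≠ dst.2 then
        (if dst.2 > cur.2 then "v" else "^") ++
          walkB n (cur.1, cur.2 + (if dst.2 > cur.2 then 1 else -1)) dst vf
      else "A"

def walkTopB (cur dst : Int × Int) : String :=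
  walkB ((dst.1 - cur.1).natAbs + (dst.2 - cur.2).natAbs + 1) cur dst (cur.2 == 0)

-- one iteration of B's loop; state = (cur, out-list)
def stepB (st : (Int × Int) × List String) (c : Char) : (Int × Int) × List String :=
  let dst := posOfB.getD c (0, 0)
  (dst, st.2 ++ [walkTopB st.1 dst])

def write_text2_alt (text : String) : String :=
  String.join (text.toList.foldl stepB ((2, 0), [])).2

-- ===== PRECONDITION & SPEC =====
def Spec_write_text2 (text : String) (out : String) : Prop := out = write_text2_alt text
instance (text : String) (out : String) : Decidable (Spec_write_text2 text out) := by unfold Spec_write_text2; infer_instance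

-- ===== CLAIM =====
def Claim_equal_write_text2 : Prop := ∀ (text : String), Dom_write_text2 text → Spec_write_text2 text (write_text2 text)

-- ===== LEMMAS AND PROOFS =====

-- the 6 keypad positions (x, y)
def posListP : List (Int × Int) := [(0,0),(1,0),(2,0),(0,1),(1,1),(2,1)]

-- A's step string as a function of source and destination position (src = (x, y))
def strA (src dst : Int × Int) : String :=
  let yv := dst.2 - src.2
  let xv := dst.1 - src.1
  if src.2 = 0 then
    ((if yv > 0 then pyMulStr "v" yv else pyMulStr "^" |yv|) ++
      (if xv > 0 then pyMulStr ">" xv else pyMulStr "<" |xv|)) ++ "A"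
  else
    ((if xv > 0 then pyMulStr ">" xv else pyMulStr "<" |xv|) ++
      (if yv > 0 then pyMulStr "v" yv else pyMulStr "^" |yv|)) ++ "A"

theorem stepA_unfold (c : Char) (y x : Int) (seq : String) :
    stepA (y, x, seq) c =
      ((charPosLoopA c keypadA 0).2, (charPosLoopA c keypadA 0).1,
        seq ++ strA (x, y) (charPosLoopA c keypadA 0)) := by
  simp only [stepA, strA]
  split_ifs <;> simp [String.append_assoc]

theorem charPos_eq (c : Char) : charPosLoopA c keypadA 0 = posOfB.getD c (0, 0) := by
  by_cases h1 : c = '^'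
  · subst h1; decide
  by_cases h2 : c = 'A'
  · subst h2; decide
  by_cases h3 : c = '<'
  · subst h3; decide
  by_cases h4 : c = 'v'
  · subst h4; decide
  by_cases h5 : c = '>'
  · subst h5; decide
  simp [charPosLoopA, keypadA, posOfB, PySem.Dict.ofList, PySem.Dict.update,
    PySem.Dict.getD_eq_get?_getD, PySem.Dict.get?_insert, h1, h2, h3, h4, h5]

theorem charPos_mem (c : Char) : posOfB.getD c (0, 0) ∈ posListP := by
  rw [← charPos_eq]
  by_cases h1 : c = '^'
  · subst h1; decide
  by_cases h2 : c = 'A'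
  · subst h2; decide
  by_cases h3 : c = '<'
  · subst h3; decide
  by_cases h4 : c = 'v'
  · subst h4; decide
  by_cases h5 : c = '>'
  · subst h5; decide
  have : charPosLoopA c keypadA 0 = (0, 0) := by
    simp [charPosLoopA, keypadA, h1, h2, h3, h4, h5]
  rw [this]; decide

set_option maxRecDepth 8192 in
theorem walk_eq_strA : ∀ s ∈ posListP, ∀ t ∈ posListP, walkTopB s t = strA s t := by decide

-- B's accumulator list only grows at the end
theorem stepB_shift : ∀ (cs : List Char) (p : Int × Int) (a : List String),
    (cs.foldl stepB (p, a)).2 = a ++ (cs.foldl stepB (p, [])).2 := by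
  intro cs
  induction cs with
  | nil => intro p a; simp
  | cons c rest ih =>
    intro p a
    simp only [List.foldl_cons, stepB]
    rw [ih _ (a ++ _), ih _ ([] ++ _)]
    simp

-- foldl string-append with a non-empty accumulator splits off the accumulator
theorem join_foldl_shift : ∀ (l : List String) (a : String),
    l.foldl (fun r s => r ++ s) a = a ++ l.foldl (fun r s => r ++ s) "" := by
  intro l
  induction l with
  | nil => intro a; simp
  | cons s rest ih =>
    intro a
    simp only [List.foldl_cons]
    rw [ih (a ++ s), ih ("" ++ s)]
    simp [String.append_assoc]

theorem join_cons (s : String) (l : List String) :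
    String.join (s :: l) = s ++ String.join l := by
  simp only [String.join, List.foldl_cons]
  rw [join_foldl_shift]
  simp

theorem fold_eq : ∀ (cs : List Char) (cur : Int × Int) (seq : String), cur ∈ posListP →
    (cs.foldl stepA (cur.2, cur.1, seq)).2.2 =
      seq ++ String.join (cs.foldl stepB (cur, [])).2 := by
  intro cs
  induction cs with
  | nil => intro cur seq _; simp [String.join]
  | cons c rest ih =>
    intro cur seq hcur
    have hdst : posOfB.getD c (0, 0) ∈ posListP := charPos_mem c
    simp only [List.foldl_cons, stepA_unfold, charPos_eq, stepB]
    rw [ih _ _ hdst, walk_eq_strA cur hcur _ hdst,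
      stepB_shift rest _ ([] ++ [strA cur (posOfB.getD c (0, 0))])]
    simp only [List.nil_append]
    simp [String.append_assoc]
    rw [join_cons]

theorem fold_eq_top (text : String) :
    (text.toList.foldl stepA (0, 2, "")).2.2 =
      String.join (text.toList.foldl stepB ((2, 0), [])).2 := by
  have := fold_eq text.toList (2, 0) "" (by decide)
  simpa using this

-- ===== VERDICT =====
theorem write_text2_spec : Claim_equal_write_text2 := by
  intro text _
  unfold Spec_write_text2 write_text2 write_text2_alt
  exact fold_eq_top text
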